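-- pv_equiv track=rewrite | github.com/1chz/learning-algorithm | seul/leetcode/study/implemantation.py | time_solution
-- ===== SOURCE A (Python) =====
-- def time_solution(n):
--     # 완전탐색 (brute forcing) 유형
--     # 가능한 모든 시각의 경우를 세서 풀 수 있음.
--     # 86400가지는 그다지 많지 않기 때문에 00:00:00부터 1씩 증가하면서 하나라도 포함되는지 확인
--     count = 0
--     for hour in range(n + 1):
--         for minute in range(60):
--             for second in range(60):
--                 if '3' in str(hour) + str(minute) + str(second):
--                     count += 1
--     return count
-- ===== SOURCE B (Python) =====
-- def time_solution(n):
--     # Per hour: every one of the 3600 minute/second pairs counts if the hour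
--     # contains '3'; otherwise exactly 1575 pairs do (45*45 = 2025 pairs have
--     # no '3' in minute or second, 3600 - 2025 = 1575).
--     count = 0
--     for hour in range(n + 1):
--         count += 3600 if '3' in str(hour) else 1575
--     return count
-- ===== Notes on version B (the rewrite author's own statement) =====
-- stated objective: faster
-- what changed: Replaces the triple loop over all 3600 minute/second pairs per hour with a single loop over hours that adds a precomputed constant (3600 if the hour contains '3', else 1575).
import Mathlib
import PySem

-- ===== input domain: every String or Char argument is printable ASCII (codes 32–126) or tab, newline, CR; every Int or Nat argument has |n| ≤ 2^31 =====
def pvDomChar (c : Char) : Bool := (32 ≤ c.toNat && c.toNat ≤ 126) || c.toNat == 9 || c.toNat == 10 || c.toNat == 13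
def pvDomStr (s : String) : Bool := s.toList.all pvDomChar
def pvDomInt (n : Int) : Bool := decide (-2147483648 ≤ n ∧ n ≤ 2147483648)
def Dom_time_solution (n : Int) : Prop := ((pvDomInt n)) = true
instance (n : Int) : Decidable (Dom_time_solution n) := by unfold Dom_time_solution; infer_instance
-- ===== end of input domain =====

-- B replaces A's triple loop (3600 minute/second checks per hour) with one loop over hours
-- adding a precomputed per-hour constant; objective: faster (constant-factor).


-- ===== PORT A =====
-- str(hour)+str(minute)+str(second) and the '3' in … test are ported on the List Char side
-- (PySem.Int.toChars / PySem.Chars.isIn), which is exact for str() output.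
def time_solution (n : Int) : Int :=
  (PySem.List.pyRange 0 (n + 1) 1).foldl (fun count hour =>
    (PySem.List.pyRange 0 60 1).foldl (fun count minute =>
      (PySem.List.pyRange 0 60 1).foldl (fun count second =>
        if PySem.Chars.isIn ['3']
            (PySem.Int.toChars hour ++ PySem.Int.toChars minute ++ PySem.Int.toChars second)
        then count + 1 else count) count) count) 0

-- ===== PORT B =====
def time_solution_alt (n : Int) : Int :=
  (PySem.List.pyRange 0 (n + 1) 1).foldl (fun count hour =>
    count + (if PySem.Chars.isIn ['3'] (PySem.Int.toChars hour) then 3600 else 1575)) 0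

-- ===== PRECONDITION & SPEC =====
def Spec_time_solution (n : Int) (out : Int) : Prop := out = time_solution_alt n
instance (n : Int) (out : Int) : Decidable (Spec_time_solution n out) := by unfold Spec_time_solution; infer_instance

-- ===== CLAIM (what is proved, stated in full; the proofs are below) =====
def Claim_equal_time_solution : Prop := ∀ (n : Int), Dom_time_solution n → Spec_time_solution n (time_solution n)

-- ===== LEMMAS AND PROOFS =====

theorem isIn_singleton (c : Char) (l : List Char) : PySem.Chars.isIn [c] l = l.contains c := by
  by_cases hm : c ∈ l
  · rw [(PySem.Chars.isIn_iff_infix [c] l).mpr ((List.singleton_infix_iff c l).mpr hm)]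
    simp [hm]
  · rw [(PySem.Chars.isIn_eq_false_iff [c] l).mpr (by simpa [List.singleton_infix_iff] using hm)]
    simp [hm]

-- the inner double loop of A, for one hour
theorem inner_eq (h acc : Int) :
    (PySem.List.pyRange 0 60 1).foldl (fun count minute =>
      (PySem.List.pyRange 0 60 1).foldl (fun count second =>
        if PySem.Chars.isIn ['3']
            (PySem.Int.toChars h ++ PySem.Int.toChars minute ++ PySem.Int.toChars second)
        then count + 1 else count) count) acc
    = acc + (if PySem.Chars.isIn ['3'] (PySem.Int.toChars h) then 3600 else 1575) := by
  have hstep : ∀ (m : Int) (a : Int),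
      (PySem.List.pyRange 0 60 1).foldl (fun count second =>
        if PySem.Chars.isIn ['3']
            (PySem.Int.toChars h ++ PySem.Int.toChars m ++ PySem.Int.toChars second)
        then count + 1 else count) a
      = a + ((PySem.List.pyRange 0 60 1).map (fun s =>
          if PySem.Chars.isIn ['3']
              (PySem.Int.toChars h ++ PySem.Int.toChars m ++ PySem.Int.toChars s)
          then (1:Int) else 0)).sum := by
    intro m a
    rw [← PySem.List.foldl_add (PySem.List.pyRange 0 60 1) _ a]
    congr 1
    funext c s
    split <;> simp
  have houter :
      (PySem.List.pyRange 0 60 1).foldl (fun count minute =>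
        (PySem.List.pyRange 0 60 1).foldl (fun count second =>
          if PySem.Chars.isIn ['3']
              (PySem.Int.toChars h ++ PySem.Int.toChars minute ++ PySem.Int.toChars second)
          then count + 1 else count) count) acc
      = acc + ((PySem.List.pyRange 0 60 1).map (fun m =>
          ((PySem.List.pyRange 0 60 1).map (fun s =>
            if PySem.Chars.isIn ['3']
                (PySem.Int.toChars h ++ PySem.Int.toChars m ++ PySem.Int.toChars s)
            then (1:Int) else 0)).sum)).sum := by
    rw [show (fun (count : Int) (minute : Int) =>
        (PySem.List.pyRange 0 60 1).foldl (fun count second =>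
          if PySem.Chars.isIn ['3']
              (PySem.Int.toChars h ++ PySem.Int.toChars minute ++ PySem.Int.toChars second)
          then count + 1 else count) count)
      = (fun (count : Int) (minute : Int) => count + ((PySem.List.pyRange 0 60 1).map (fun s =>
          if PySem.Chars.isIn ['3']
              (PySem.Int.toChars h ++ PySem.Int.toChars minute ++ PySem.Int.toChars s)
          then (1:Int) else 0)).sum) from funext fun c => funext fun m => hstep m c]
    exact PySem.List.foldl_add _ _ acc
  rw [houter]
  by_cases hb : PySem.Chars.isIn ['3'] (PySem.Int.toChars h) = true
  · have hmem : '3' ∈ PySem.Int.toChars h := by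
      simpa [isIn_singleton] using hb
    have hc : ∀ m s : Int,
        PySem.Chars.isIn ['3']
          (PySem.Int.toChars h ++ PySem.Int.toChars m ++ PySem.Int.toChars s) = true := by
      intro m s
      simp [isIn_singleton, hmem]
    have h3600 : ((PySem.List.pyRange 0 60 1).map (fun _ =>
        ((PySem.List.pyRange 0 60 1).map (fun _ => (1:Int))).sum)).sum = 3600 := by decide
    simp only [hc, if_true, hb]
    rw [h3600]
  · have hmem : '3' ∉ PySem.Int.toChars h := by
      simpa [isIn_singleton] using hb
    have hc : ∀ m s : Int,
        PySem.Chars.isIn ['3']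
          (PySem.Int.toChars h ++ (PySem.Int.toChars m ++ PySem.Int.toChars s))
        = PySem.Chars.isIn ['3'] (PySem.Int.toChars m ++ PySem.Int.toChars s) := by
      intro m s
      simp [isIn_singleton, hmem]
    have hb' : PySem.Chars.isIn ['3'] (PySem.Int.toChars h) = false := by
      simpa [isIn_singleton] using hmem
    have h1575 : ((PySem.List.pyRange 0 60 1).map (fun m =>
        ((PySem.List.pyRange 0 60 1).map (fun s =>
          if PySem.Chars.isIn ['3'] (PySem.Int.toChars m ++ PySem.Int.toChars s)
          then (1:Int) else 0)).sum)).sum = 1575 := by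
      set_option maxRecDepth 10000 in decide
    simp only [List.append_assoc, hc, hb']
    rw [h1575]
    simp

-- ===== VERDICT (by name: the statement is the Claim_ definition above) =====
theorem time_solution_spec : Claim_equal_time_solution := by
  intro n _
  unfold Spec_time_solution time_solution time_solution_alt
  congr 1
  funext count hour
  exact inner_eq hour count
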